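-- pv_equiv track=rewrite | github.com/Luftom/inssLLG | gerador_sem_spacy.py | formatar_texto
-- ===== SOURCE A (Python) =====
-- def formatar_texto(palavras):
--     #Ajusta pontuação, letra maiuscula após ponto e corta no último ponto final.
--     ultimo_ponto = None
--     for i in reversed(range(len(palavras))):
--         if palavras[i] == '.':
--             ultimo_ponto = i
--             break
--     if ultimo_ponto is not None:
--         palavras = palavras[:ultimo_ponto + 1]#se já tiver achado algum . ele para nesse ultimo . a frase
--
--     texto = ''
--     nova_frase = True
--
--     for palavra in palavras: #junta a pontuação a palavra e deixa maiuscula depois do ponto final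
--         if palavra in '.!?;:—':
--             texto = texto + palavra
--             nova_frase = True
--         elif palavra == ',':
--             texto = texto + palavra
--             nova_frase = False
--         else:
--             if nova_frase:
--                 palavra = palavra.capitalize() #deixa maiusculo a primeira letra
--                 nova_frase = False
--             texto += ' ' + palavra
--
--     return texto.strip()
-- ===== SOURCE B (Python) =====
-- def formatar_texto(palavras):
--     # One forward pass: build the text with the same punctuation/capitalization
--     # state machine, recording the text length at each exact '.' token; cut there at the end.
--     texto = ''
--     nova_frase = True
--     last_len = None
--     for palavra in palavras:
--         if palavra in '.!?;:—':
--             texto = texto + palavra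
--             nova_frase = True
--             if palavra == '.':
--                 last_len = len(texto)
--         elif palavra == ',':
--             texto = texto + palavra
--             nova_frase = False
--         else:
--             if nova_frase:
--                 palavra = palavra.capitalize()
--                 nova_frase = False
--             texto += ' ' + palavra
--     if last_len is not None:
--         texto = texto[:last_len]
--     return texto.strip()
-- ===== Notes on version B (the rewrite author's own statement) =====
-- stated objective: alternative
-- what changed: B replaces A's separate backwards scan for the last '.' plus list pre-truncation by a single forward pass that records the text length at each exact '.' token and cuts the built text there once at the end.
import Mathlib
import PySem

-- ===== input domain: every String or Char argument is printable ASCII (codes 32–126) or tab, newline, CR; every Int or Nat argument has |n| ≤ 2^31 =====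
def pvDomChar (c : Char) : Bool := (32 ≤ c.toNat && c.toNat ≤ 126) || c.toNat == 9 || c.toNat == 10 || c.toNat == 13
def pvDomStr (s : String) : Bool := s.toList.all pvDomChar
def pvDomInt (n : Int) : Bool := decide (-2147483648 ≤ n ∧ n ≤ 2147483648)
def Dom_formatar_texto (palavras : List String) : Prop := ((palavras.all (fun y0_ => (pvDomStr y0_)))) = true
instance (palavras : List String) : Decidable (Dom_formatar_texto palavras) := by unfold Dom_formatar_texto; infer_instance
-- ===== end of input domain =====

-- B merges A's two passes into one forward pass (record the text length at each '.' and cut once at the end); objective: alternative single-pass decomposition.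


-- str.capitalize(): first char to upper, rest lowered — exact on the ASCII domain (PySem has no capitalize)
def pvCapitalize (cs : List Char) : List Char :=
  match cs with
  | [] => []
  | c :: rest => c.toUpper :: PySem.Chars.lower rest

-- ===== PORT A =====
-- the reversed(range(len(palavras))) search with break: first index (from the right) whose word is "."
def pvUltimoLoop (palavras : List String) : List Nat → Option Nat
  | [] => none
  | i :: rest => if palavras.getD i "" = "." then some i else pvUltimoLoop palavras rest

-- A's loop body: state = (texto as chars, nova_frase)
def pvStepA (st : List Char × Bool) (palavra : String) : List Char × Bool :=
  if PySem.Chars.isIn palavra.toList ".!?;:—".toList then (st.1 ++ palavra.toList, true)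
  else if palavra = "," then (st.1 ++ palavra.toList, false)
  else if st.2 then (st.1 ++ ' ' :: pvCapitalize palavra.toList, false)
  else (st.1 ++ ' ' :: palavra.toList, false)

def formatar_texto (palavras : List String) : String :=
  let ultimo := pvUltimoLoop palavras (List.range palavras.length).reverse
  let palavras' := match ultimo with
    | some u => palavras.take (u + 1)   -- palavras[:ultimo+1]
    | none => palavras
  let st := palavras'.foldl pvStepA ([], true)
  String.ofList (PySem.Chars.strip st.1)

-- ===== PORT B =====
-- B's loop body: state = (texto, nova_frase, last_len)
def pvStepB (st : List Char × Bool × Option Nat) (palavra : String) : List Char × Bool × Option Nat :=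
  if PySem.Chars.isIn palavra.toList ".!?;:—".toList then
    (st.1 ++ palavra.toList, true,
      if palavra = "." then some (st.1 ++ palavra.toList).length else st.2.2)
  else if palavra = "," then (st.1 ++ palavra.toList, false, st.2.2)
  else if st.2.1 then (st.1 ++ ' ' :: pvCapitalize palavra.toList, false, st.2.2)
  else (st.1 ++ ' ' :: palavra.toList, false, st.2.2)

def formatar_texto_alt (palavras : List String) : String :=
  let st := palavras.foldl pvStepB ([], true, none)
  let texto := match st.2.2 with
    | some k => st.1.take k   -- texto[:last_len], last_len = a recorded length ≥ 0
    | none => st.1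
  String.ofList (PySem.Chars.strip texto)

-- ===== PRECONDITION & SPEC =====
def Spec_formatar_texto (palavras : List String) (out : String) : Prop := out = formatar_texto_alt palavras
instance (palavras : List String) (out : String) : Decidable (Spec_formatar_texto palavras out) := by unfold Spec_formatar_texto; infer_instance

-- ===== CLAIM (what is proved, stated in full; the proofs are below) =====
def Claim_equal_formatar_texto : Prop := ∀ (palavras : List String), Dom_formatar_texto palavras → Spec_formatar_texto palavras (formatar_texto palavras)

-- ===== LEMMAS AND PROOFS =====

-- one B step projects to one A step
theorem pv_stepB_proj (s : List Char × Bool × Option Nat) (x : String) :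
    ((pvStepB s x).1, (pvStepB s x).2.1) = pvStepA (s.1, s.2.1) x := by
  unfold pvStepA pvStepB; split_ifs <;> rfl

-- B's (texto, nova_frase) components evolve exactly as A's state
theorem pv_foldB_proj (l : List String) (t : List Char) (n : Bool) (o : Option Nat) :
    ((l.foldl pvStepB (t, n, o)).1, (l.foldl pvStepB (t, n, o)).2.1) = l.foldl pvStepA (t, n) := by
  induction l generalizing t n o with
  | nil => rfl
  | cons x xs ih =>
      have hstep := pv_stepB_proj (t, n, o) x
      rcases hpb : pvStepB (t, n, o) x with ⟨a, b, c⟩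
      rw [hpb] at hstep
      simp only [List.foldl_cons, hpb, ih a b c, ← hstep]

-- each step only appends to the text
theorem pv_stepB_grows (s : List Char × Bool × Option Nat) (x : String) :
    ∃ d, (pvStepB s x).1 = s.1 ++ d := by
  unfold pvStepB; split_ifs <;> exact ⟨_, rfl⟩

-- the text only grows along the loop
theorem pv_foldB_grows (l : List String) (s : List Char × Bool × Option Nat) :
    ∃ e, (l.foldl pvStepB s).1 = s.1 ++ e := by
  induction l generalizing s with
  | nil => exact ⟨[], by simp⟩
  | cons x xs ih =>
      obtain ⟨d, hd⟩ := pv_stepB_grows s x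
      obtain ⟨e, he⟩ := ih (pvStepB s x)
      exact ⟨d ++ e, by rw [List.foldl_cons, he, hd, List.append_assoc]⟩

-- a non-"." token leaves last_len unchanged
theorem pv_stepB_lastLen (s : List Char × Bool × Option Nat) (x : String) (hx : x ≠ ".") :
    (pvStepB s x).2.2 = s.2.2 := by
  unfold pvStepB; split_ifs <;> simp_all

-- no "." token in l: last_len unchanged
theorem pv_foldB_lastLen (l : List String) (s : List Char × Bool × Option Nat)
    (h : "." ∉ l) : (l.foldl pvStepB s).2.2 = s.2.2 := by
  induction l generalizing s with
  | nil => rfl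
  | cons x xs ih =>
      simp only [List.mem_cons, not_or] at h
      rw [List.foldl_cons, ih _ h.2, pv_stepB_lastLen s x (fun hx => h.1 hx.symm)]

-- the "." step records exactly the new text length
theorem pv_stepB_dot (s : List Char × Bool × Option Nat) :
    pvStepB s "." = (s.1 ++ ['.'], true, some (s.1 ++ ['.']).length) := by
  unfold pvStepB
  rw [if_pos (by decide : PySem.Chars.isIn ".".toList ".!?;:—".toList = true), if_pos rfl]
  simp

-- the reversed-range search: none means no word (by getD) is "."
theorem pv_ultimo_none (p : List String) (n : Nat)
    (h : pvUltimoLoop p (List.range n).reverse = none) :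
    ∀ j < n, p.getD j "" ≠ "." := by
  induction n with
  | zero => intro j hj; omega
  | succ m ih =>
      rw [List.range_succ, List.reverse_append] at h
      simp only [List.reverse_singleton, List.singleton_append, pvUltimoLoop] at h
      split_ifs at h with hd
      intro j hj
      rcases Nat.lt_succ_iff_lt_or_eq.mp hj with hlt | rfl
      · exact ih h j hlt
      · exact hd

-- the reversed-range search: some u means p[u] = "." and nothing after u is "."
theorem pv_ultimo_some (p : List String) (n : Nat) (u : Nat)
    (h : pvUltimoLoop p (List.range n).reverse = some u) :
    u < n ∧ p.getD u "" = "." ∧ ∀ j, u < j → j < n → p.getD j "" ≠ "." := by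
  induction n with
  | zero => simp [pvUltimoLoop] at h
  | succ m ih =>
      rw [List.range_succ, List.reverse_append] at h
      simp only [List.reverse_singleton, List.singleton_append, pvUltimoLoop] at h
      split_ifs at h with hd
      · obtain rfl : m = u := by simpa using h
        exact ⟨Nat.lt_succ_self _, hd, fun j h1 h2 => by omega⟩
      · obtain ⟨h1, h2, h3⟩ := ih h
        refine ⟨by omega, h2, fun j hj1 hj2 => ?_⟩
        rcases Nat.lt_succ_iff_lt_or_eq.mp hj2 with hlt | rfl
        · exact h3 j hj1 hlt
        · exact hd

-- ===== VERDICT (by name: the statement is the Claim_ definition above) =====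
theorem formatar_texto_spec : Claim_equal_formatar_texto := by
  intro palavras _
  unfold Spec_formatar_texto formatar_texto formatar_texto_alt
  cases h : pvUltimoLoop palavras (List.range palavras.length).reverse with
  | none =>
      -- no "." in palavras: B's last_len stays none and both build the same text
      have hno : ("." : String) ∉ palavras := by
        intro hmem
        obtain ⟨i, hi, hgi⟩ := List.mem_iff_getElem.mp hmem
        exact pv_ultimo_none palavras _ h i hi (by rw [List.getD_eq_getElem _ _ hi, hgi])
      have hll := pv_foldB_lastLen palavras ([], true, none) hno
      have hproj := pv_foldB_proj palavras [] true none
      simp only [Prod.ext_iff] at hproj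
      simp only [hll, hproj.1]
  | some u =>
      obtain ⟨hu, hdot, hafter⟩ := pv_ultimo_some palavras _ u h
      set l₁ := palavras.take (u + 1) with hl₁
      set l₂ := palavras.drop (u + 1) with hl₂
      have hsplit : palavras = l₁ ++ l₂ := (List.take_append_drop _ _).symm
      have hl₁eq : l₁ = palavras.take u ++ ["."] := by
        rw [hl₁, List.take_add_one]
        congr 1
        rw [List.getElem?_eq_getElem hu]
        show [palavras[u]] = ["."]
        rw [← List.getD_eq_getElem palavras "" hu, hdot]
      have hno₂ : ("." : String) ∉ l₂ := by
        intro hmem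
        obtain ⟨i, hi, hgi⟩ := List.mem_iff_getElem.mp hmem
        rw [List.getElem_drop] at hgi
        have hlen : u + 1 + i < palavras.length := by
          rw [hl₂, List.length_drop] at hi; omega
        exact hafter (u + 1 + i) (by omega) hlen
          (by rw [List.getD_eq_getElem _ _ hlen, hgi])
      set mid := l₁.foldl pvStepB ([], true, none) with hmid
      have hmid2 : mid.2.2 = some mid.1.length := by
        rw [hmid, hl₁eq, List.foldl_append, List.foldl_cons, List.foldl_nil, pv_stepB_dot]
      have hfold : palavras.foldl pvStepB ([], true, none) = l₂.foldl pvStepB mid := by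
        conv_lhs => rw [hsplit]
        rw [List.foldl_append]
      obtain ⟨e, he⟩ := pv_foldB_grows l₂ mid
      have hll := pv_foldB_lastLen l₂ mid hno₂
      have hproj := pv_foldB_proj l₁ [] true none
      simp only [Prod.ext_iff] at hproj
      simp only [hfold, hll, hmid2, he, List.take_left]
      rw [hmid, hproj.1]
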